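-- pv_equiv track=rewrite | github.com/A100467/ATP2022 | TPC6/aulap6.py | titporAno
-- ===== SOURCE A (Python) =====
-- def titporAno(obras):
--     dict = {}
--     for nome, _, ano, *_ in obras:
--         if ano in dict.keys():
--             dict[ano].append(nome)
--         else:
--             dict[ano] = [nome]
--     return dict
-- ===== SOURCE B (Python) =====
-- def titporAno(obras):
--     anos = []
--     for _, _, ano, *_ in obras:
--         if ano not in anos:
--             anos.append(ano)
--     return {ano: [nome for nome, _, a, *_ in obras if a == ano] for ano in anos}
-- ===== Notes on version B (the rewrite author's own statement) =====
-- stated objective: alternative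
-- what changed: Replaces the one-pass dict aggregation (membership test + append/insert per record) by a two-pass strategy: first collect the distinct years in first-occurrence order, then build each year's name list with a single filtering comprehension over the whole input.
import Mathlib
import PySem

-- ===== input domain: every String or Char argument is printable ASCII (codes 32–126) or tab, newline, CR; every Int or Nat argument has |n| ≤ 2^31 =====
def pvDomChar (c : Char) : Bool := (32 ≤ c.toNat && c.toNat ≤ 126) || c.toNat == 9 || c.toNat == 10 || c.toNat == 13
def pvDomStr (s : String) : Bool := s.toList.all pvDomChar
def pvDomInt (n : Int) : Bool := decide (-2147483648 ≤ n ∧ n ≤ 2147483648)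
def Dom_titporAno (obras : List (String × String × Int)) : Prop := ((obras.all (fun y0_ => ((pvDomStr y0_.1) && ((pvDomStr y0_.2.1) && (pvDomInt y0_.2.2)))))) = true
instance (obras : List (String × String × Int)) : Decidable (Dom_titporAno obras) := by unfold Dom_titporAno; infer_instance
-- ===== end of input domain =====

-- B groups by a two-pass strategy (distinct years first, then one filtering scan per year)
-- instead of A's one-pass dict aggregation; alternative decomposition, same result.


-- ===== PORT A =====
def titporAno (obras : List (String × String × Int)) : List (Int × List String) :=
  (obras.foldl (fun d p =>
      if d.contains p.2.2 then d.modify p.2.2 [] (fun l => l ++ [p.1])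
      else d.insert p.2.2 [p.1])
    (PySem.Dict.empty : PySem.Dict Int (List String))).items

-- ===== PORT B =====
def titporAno_alt (obras : List (String × String × Int)) : List (Int × List String) :=
  let anos := obras.foldl (fun acc p => if p.2.2 ∈ acc then acc else acc ++ [p.2.2]) ([] : List Int)
  anos.map (fun a => (a, (obras.filter (fun p => p.2.2 == a)).map (fun p => p.1)))

-- ===== PRECONDITION & SPEC =====
def Spec_titporAno (obras : List (String × String × Int)) (out : List (Int × List String)) : Prop := out = titporAno_alt obras
instance (obras : List (String × String × Int)) (out : List (Int × List String)) : Decidable (Spec_titporAno obras out) := by unfold Spec_titporAno; infer_instance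

-- ===== CLAIM (what is proved, stated in full; the proofs are below) =====
def Claim_equal_titporAno : Prop := ∀ (obras : List (String × String × Int)), Dom_titporAno obras → Spec_titporAno obras (titporAno obras)

-- ===== LEMMAS AND PROOFS =====

-- A's branch (membership test, then append or fresh insert) is exactly dict.modify with default [].
theorem titporAno_step_eq (d : PySem.Dict Int (List String)) (p : String × String × Int) :
    (if d.contains p.2.2 then d.modify p.2.2 [] (fun l => l ++ [p.1])
     else d.insert p.2.2 [p.1])
    = d.modify p.2.2 [] (fun l => l ++ [p.1]) := by
  by_cases h : d.contains p.2.2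
  · simp [h]
  · have h' : d.contains p.2.2 = false := by simpa using h
    simp [h', PySem.Dict.modify, PySem.Dict.insert, PySem.Dict.getD_of_not_contains (d := d) (d0 := []) h']

theorem titporAno_spec : Claim_equal_titporAno := by
  intro obras _
  unfold Spec_titporAno titporAno titporAno_alt
  have hstep : obras.foldl (fun d p =>
      if d.contains p.2.2 then d.modify p.2.2 [] (fun l => l ++ [p.1])
      else d.insert p.2.2 [p.1]) (PySem.Dict.empty : PySem.Dict Int (List String))
      = obras.foldl (fun d p => d.modify p.2.2 [] (fun l => l ++ [p.1])) PySem.Dict.empty := by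
    apply PySem.List.foldl_congr_mem
    intro d p _
    exact titporAno_step_eq d p
  rw [hstep]
  set F := obras.foldl (fun d p => d.modify p.2.2 [] (fun l => l ++ [p.1]))
      (PySem.Dict.empty : PySem.Dict Int (List String)) with hF
  have hnd : F.keys.Nodup := by
    rw [hF]
    exact PySem.Dict.nodup_keys_foldl_modify_key obras (fun p => p.2.2) []
      (fun d p l => l ++ [p.1]) _ (by simp)
  have hanos : obras.foldl (fun acc p => if p.2.2 ∈ acc then acc else acc ++ [p.2.2]) ([] : List Int)
      = F.keys := by
    rw [hF, PySem.Dict.keys_foldl_modify_key, PySem.Dict.keys_empty,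
      PySem.Set.update_nil_left, PySem.Set.ofList_eq_foldl, List.foldl_map]
    simp [PySem.Set.add_eq_ite]
  have hgetD : ∀ c : Int, F.getD c []
      = (obras.filter (fun p => p.2.2 == c)).map (fun p => p.1) := by
    intro c
    have hmap : F = (obras.map (fun p => (p.2.2, p.1))).foldl
        (fun d q => d.modify q.1 [] (fun l => l ++ [q.2])) PySem.Dict.empty := by
      rw [hF, List.foldl_map]
    rw [hmap, PySem.Dict.getD_foldl_modify_append]
    simp [List.filter_map, Function.comp_def]
  rw [hanos, PySem.Dict.items_eq_map_keys F hnd []]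
  apply List.map_congr_left
  intro k _
  rw [hgetD k]
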